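-- pv_equiv track=rewrite | github.com/tiegemccarthy/stationFeedbackDB | parseCorrSkd.py | extractRelevantSections
-- ===== SOURCE A (Python) =====
-- def extractRelevantSections(all_corr_sections, version):
--     if version == 3:
--         relevant_tags = ['STATION', 'DROP', 'MANUAL', 'SNR','NOTE', 'QCODES']
--     else:
--         relevant_tags = ['STATION', 'DROP', 'MANUAL', 'SNR']
--     relevant_sections = []
--     for tag in relevant_tags:
--         for section in all_corr_sections:
--             if tag in section[0:15]:
--                 relevant_sections.append(section)
--     return relevant_sections
-- ===== SOURCE B (Python) =====
-- def extractRelevantSections(all_corr_sections, version):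
--     if version == 3:
--         relevant_tags = ['STATION', 'DROP', 'MANUAL', 'SNR', 'NOTE', 'QCODES']
--     else:
--         relevant_tags = ['STATION', 'DROP', 'MANUAL', 'SNR']
--     buckets = {}
--     for section in all_corr_sections:
--         for tag in relevant_tags:
--             if tag in section[0:15]:
--                 buckets.setdefault(tag, []).append(section)
--     result = []
--     for tag in relevant_tags:
--         result.extend(buckets.get(tag, []))
--     return result
-- ===== Notes on version B (the rewrite author's own statement) =====
-- stated objective: alternative
-- what changed: One pass over the sections building a tag-keyed dict of buckets (appending a section to every matching tag's bucket), then concatenating the buckets in tag order, instead of re-scanning the whole section list once per tag.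
import Mathlib
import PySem

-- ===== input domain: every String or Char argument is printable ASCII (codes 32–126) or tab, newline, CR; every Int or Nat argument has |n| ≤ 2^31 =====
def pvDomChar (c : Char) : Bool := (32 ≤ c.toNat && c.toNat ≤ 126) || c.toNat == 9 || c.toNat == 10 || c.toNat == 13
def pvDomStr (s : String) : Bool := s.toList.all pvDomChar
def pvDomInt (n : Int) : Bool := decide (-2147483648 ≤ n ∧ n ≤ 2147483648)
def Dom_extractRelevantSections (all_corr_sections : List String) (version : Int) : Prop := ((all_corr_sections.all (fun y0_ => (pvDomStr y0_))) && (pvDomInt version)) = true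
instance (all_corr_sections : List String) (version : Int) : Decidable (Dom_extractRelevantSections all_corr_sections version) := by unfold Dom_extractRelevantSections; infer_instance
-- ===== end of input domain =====

-- B builds a tag-keyed dict of buckets in one pass over the sections and then
-- concatenates the buckets in tag order, instead of rescanning the list per tag
-- (objective: alternative decomposition, same cost).


-- ===== PORT A =====
-- literal port: for tag in relevant_tags: for section in all_corr_sections:
--   if tag in section[0:15]: relevant_sections.append(section)
def extractRelevantSections (all_corr_sections : List String) (version : Int) : List String :=
  let relevant_tags : List String :=
    if version == 3 then ["STATION", "DROP", "MANUAL", "SNR", "NOTE", "QCODES"]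
    else ["STATION", "DROP", "MANUAL", "SNR"]
  relevant_tags.foldl (fun relevant_sections tag =>
    all_corr_sections.foldl (fun relevant_sections section_ =>
      if PySem.Str.isIn tag (PySem.Str.slice section_ (some 0) (some 15)) then
        relevant_sections ++ [section_]
      else relevant_sections) relevant_sections) []

-- ===== PORT B =====
-- 'tag in section[0:15]'
def pvTagMatches (tag section_ : String) : Bool :=
  PySem.Str.isIn tag (PySem.Str.slice section_ (some 0) (some 15))

-- inner loop of B: add one section to the bucket of every matching tag
-- (buckets.setdefault(tag, []).append(section) = modify tag [] (· ++ [section]))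
def pvAddSection (tags : List String) (buckets : PySem.Dict String (List String))
    (section_ : String) : PySem.Dict String (List String) :=
  tags.foldl (fun buckets tag =>
    if pvTagMatches tag section_ then buckets.modify tag [] (· ++ [section_])
    else buckets) buckets

def extractRelevantSections_alt (all_corr_sections : List String) (version : Int) : List String :=
  let relevant_tags : List String :=
    if version == 3 then ["STATION", "DROP", "MANUAL", "SNR", "NOTE", "QCODES"]
    else ["STATION", "DROP", "MANUAL", "SNR"]
  let buckets := all_corr_sections.foldl (pvAddSection relevant_tags) PySem.Dict.empty
  relevant_tags.foldl (fun result tag => result ++ buckets.getD tag []) []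

-- ===== PRECONDITION & SPEC =====
def Spec_extractRelevantSections (all_corr_sections : List String) (version : Int) (out : List String) : Prop := out = extractRelevantSections_alt all_corr_sections version
instance (all_corr_sections : List String) (version : Int) (out : List String) : Decidable (Spec_extractRelevantSections all_corr_sections version out) := by unfold Spec_extractRelevantSections; infer_instance

-- ===== CLAIM (what is proved, stated in full; the proofs are below) =====
def Claim_equal_extractRelevantSections : Prop := ∀ (all_corr_sections : List String) (version : Int), Dom_extractRelevantSections all_corr_sections version → Spec_extractRelevantSections all_corr_sections version (extractRelevantSections all_corr_sections version)

-- ===== LEMMAS AND PROOFS =====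

-- a tag not in the inner loop's list keeps its bucket
theorem pvAddSection_getD_of_not_mem (tags : List String)
    (buckets : PySem.Dict String (List String)) (s t : String) (h : t ∉ tags) :
    (pvAddSection tags buckets s).getD t [] = buckets.getD t [] := by
  induction tags generalizing buckets with
  | nil => rfl
  | cons u ts ih =>
    simp only [List.mem_cons, not_or] at h
    simp only [pvAddSection, List.foldl_cons]
    rw [show (ts.foldl _ _ = pvAddSection ts _ s) from rfl, ih _ h.2]
    split
    · exact PySem.Dict.getD_modify_of_ne _ _ _ h.1
    · rfl

-- a tag in the (duplicate-free) list gets exactly its match appended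
theorem pvAddSection_getD_self (tags : List String)
    (buckets : PySem.Dict String (List String)) (s t : String)
    (ht : t ∈ tags) (hnd : tags.Nodup) :
    (pvAddSection tags buckets s).getD t []
      = buckets.getD t [] ++ (if pvTagMatches t s then [s] else []) := by
  induction tags generalizing buckets with
  | nil => cases ht
  | cons u ts ih =>
    simp only [List.nodup_cons] at hnd
    simp only [pvAddSection, List.foldl_cons]
    rcases List.mem_cons.mp ht with h | h
    · subst h
      rw [show (ts.foldl _ _ = pvAddSection ts _ s) from rfl,
        pvAddSection_getD_of_not_mem ts _ s t hnd.1]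
      split
      · rw [PySem.Dict.getD_modify_self]
      · simp
    · rw [show (ts.foldl _ _ = pvAddSection ts _ s) from rfl, ih _ h hnd.2]
      have hne : t ≠ u := fun he => hnd.1 (he ▸ h)
      split
      · rw [PySem.Dict.getD_modify_of_ne _ _ _ hne]
      · rfl

-- invariant of the outer pass: every bucket is the filtered section list, in order
theorem pvBuckets_getD (ss : List String) (tags : List String)
    (buckets : PySem.Dict String (List String)) (t : String)
    (ht : t ∈ tags) (hnd : tags.Nodup) :
    (ss.foldl (pvAddSection tags) buckets).getD t []
      = buckets.getD t [] ++ ss.filter (fun s => pvTagMatches t s) := by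
  induction ss generalizing buckets with
  | nil => simp
  | cons s ss ih =>
    rw [List.foldl_cons, ih, pvAddSection_getD_self tags buckets s t ht hnd,
      List.filter_cons]
    split <;> simp

-- both programs, per tag, reduce to 'append the filtered section list'
theorem pvBothSides (ss : List String) (tags : List String) (hnd : tags.Nodup) :
    tags.foldl (fun acc tag =>
        ss.foldl (fun acc s =>
          if PySem.Str.isIn tag (PySem.Str.slice s (some 0) (some 15)) then acc ++ [s]
          else acc) acc) []
      = tags.foldl (fun acc tag =>
          acc ++ (ss.foldl (pvAddSection tags) PySem.Dict.empty).getD tag []) [] := by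
  apply PySem.List.foldl_congr_mem
  intro acc t ht
  rw [pvBuckets_getD ss tags PySem.Dict.empty t ht hnd, PySem.Dict.getD_empty]
  have := PySem.List.foldl_append_if (fun s => pvTagMatches t s) (id : String → String) ss acc
  simpa [pvTagMatches] using this

-- ===== VERDICT (by name: the statement is the Claim_ definition above) =====
theorem extractRelevantSections_spec : Claim_equal_extractRelevantSections := by
  intro ss v _
  unfold Spec_extractRelevantSections extractRelevantSections extractRelevantSections_alt
  by_cases h : v == 3 <;>
    simp only [h, if_pos, Bool.false_eq_true, ite_false] <;>
    exact pvBothSides ss _ (by decide)
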